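-- pv_equiv track=rewrite | github.com/YoussefElHassani/TSDOC.JS | part1/python/error_graph.py | delete_empty_layouts
-- ===== SOURCE A (Python) =====
-- def delete_empty_layouts(dictionary):
--     keys = []
--     # Find unalocated nodes
--     for key,value in dictionary.items():
--         if value['available'] == True:
--             keys.append(key)
--             continue
--     # Proceed to delete those
--     for key in keys:
--         dictionary.pop(key, None)
--     # Return the dictionary
--     return dictionary
-- ===== SOURCE B (Python) =====
-- def delete_empty_layouts(dictionary):
--     # Fixpoint loop: repeatedly scan for ONE entry whose 'available' is True
--     # and delete it, until a full scan finds none. No key list is ever built.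
--     while True:
--         doomed = None
--         for key, value in dictionary.items():
--             if value['available'] == True:
--                 doomed = key
--                 break
--         if doomed is None:
--             return dictionary
--         del dictionary[doomed]
-- ===== Notes on version B (the rewrite author's own statement) =====
-- stated objective: alternative
-- what changed: B replaces A's two staged passes (collect all doomed keys into a list, then pop each) with a fixpoint loop that rescans the dict, deletes the first flagged entry it finds, and repeats until a scan finds none; no key list is ever materialised.
import Mathlib
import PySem

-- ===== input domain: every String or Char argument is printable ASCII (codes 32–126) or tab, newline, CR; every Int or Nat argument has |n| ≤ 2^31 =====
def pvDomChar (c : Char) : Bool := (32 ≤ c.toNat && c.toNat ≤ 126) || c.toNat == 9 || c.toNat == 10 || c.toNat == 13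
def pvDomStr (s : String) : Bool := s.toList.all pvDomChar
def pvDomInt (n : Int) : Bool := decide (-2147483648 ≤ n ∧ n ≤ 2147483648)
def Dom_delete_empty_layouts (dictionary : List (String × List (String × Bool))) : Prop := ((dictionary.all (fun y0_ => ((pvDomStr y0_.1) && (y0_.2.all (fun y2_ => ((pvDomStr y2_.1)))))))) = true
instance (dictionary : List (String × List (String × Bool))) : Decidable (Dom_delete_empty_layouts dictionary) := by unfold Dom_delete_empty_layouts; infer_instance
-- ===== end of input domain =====

-- B replaces A's two staged passes (collect doomed keys, then pop them) with a fixpoint loop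
-- that rescans the dict, deletes the first flagged entry found, and repeats until none is found;
-- both mutate the argument dict in place to the same final contents (equivalence is about the
-- returned value).
-- ===== PORT A =====
-- A: collect the keys whose value has available == True, then pop each of them.
def delete_empty_layouts (dictionary : List (String × List (String × Bool))) : List (String × List (String × Bool)) :=
  let d := PySem.Dict.ofList dictionary
  let keys := d.items.foldl
    (fun ks kv => if ((PySem.Dict.ofList kv.2).get? "available") == some true then ks ++ [kv.1] else ks)
    ([] : List String)
  (keys.foldl (fun dd k => dd.erase k) d).items

-- ===== PORT B =====
-- termination fact for the B loop: deleting a found entry strictly shrinks the items list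
theorem pvEraseLenLt (d : PySem.Dict String (List (String × Bool)))
    (kv : String × List (String × Bool)) (h : kv ∈ d.items) :
    (d.erase kv.1).items.length < d.items.length := by
  have : (d.erase kv.1).items = d.items.filter (fun p => !(p.1 == kv.1)) := rfl
  rw [this]
  refine List.length_filter_lt_length_iff_exists.2 ⟨kv, h, by simp⟩

-- B's while-loop: find the first flagged entry; if none, done; else delete it and loop again.
def pvAltLoop (d : PySem.Dict String (List (String × Bool))) : PySem.Dict String (List (String × Bool)) :=
  match hfind : d.items.find? (fun kv => ((PySem.Dict.ofList kv.2).get? "available") == some true) with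
  | none => d
  | some kv => pvAltLoop (d.erase kv.1)
termination_by d.items.length
decreasing_by exact pvEraseLenLt d kv (List.mem_of_find?_eq_some hfind)

def delete_empty_layouts_alt (dictionary : List (String × List (String × Bool))) : List (String × List (String × Bool)) :=
  (pvAltLoop (PySem.Dict.ofList dictionary)).items

-- ===== PRECONDITION & SPEC =====
-- Pre_ excludes dicts where some value lacks the key "available": there Python A raises KeyError.
def Pre_delete_empty_layouts (dictionary : List (String × List (String × Bool))) : Prop :=
  (dictionary.all (fun kv => kv.2.any (fun p => p.1 == "available"))) = true
instance (dictionary : List (String × List (String × Bool))) : Decidable (Pre_delete_empty_layouts dictionary) := by unfold Pre_delete_empty_layouts; infer_instance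
def pvWitness_delete_empty_layouts : (List (String × List (String × Bool))) :=
  [("a", [("available", true)]), ("b", [("available", false)])]
def Spec_delete_empty_layouts (dictionary : List (String × List (String × Bool))) (out : List (String × List (String × Bool))) : Prop := out = delete_empty_layouts_alt dictionary
instance (dictionary : List (String × List (String × Bool))) (out : List (String × List (String × Bool))) : Decidable (Spec_delete_empty_layouts dictionary out) := by unfold Spec_delete_empty_layouts; infer_instance

-- ===== CLAIM (what is proved, stated in full; the proofs are below) =====
def Claim_equal_delete_empty_layouts : Prop := ∀ (dictionary : List (String × List (String × Bool))), Dom_delete_empty_layouts dictionary → Pre_delete_empty_layouts dictionary → Spec_delete_empty_layouts dictionary (delete_empty_layouts dictionary)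

-- ===== LEMMAS AND PROOFS =====

-- the flag test both programs apply to an entry
def pvP (kv : String × List (String × Bool)) : Bool :=
  ((PySem.Dict.ofList kv.2).get? "available") == some true

-- B's loop computes the filter of the items by ¬pvP, for any dict with distinct keys
theorem pvAltLoop_items (d : PySem.Dict String (List (String × Bool))) (h : d.keys.Nodup) :
    (pvAltLoop d).items = d.items.filter (fun kv => !(pvP kv)) := by
  unfold pvAltLoop
  split
  · next hfind =>
    have hall := List.find?_eq_none.1 hfind
    symm
    refine List.filter_eq_self.2 ?_
    intro kv hkv
    have := hall kv hkv
    simp only [pvP]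
    revert this; cases hb : (((PySem.Dict.ofList kv.2).get? "available") == some true) <;> simp
  · next kv hfind =>
    have hkv : kv ∈ d.items := List.mem_of_find?_eq_some hfind
    have hP : pvP kv = true := List.find?_some hfind
    have herase : (d.erase kv.1).items = d.items.filter (fun p => !(p.1 == kv.1)) := rfl
    have hnd' : (d.erase kv.1).keys.Nodup := by
      have : (d.erase kv.1).keys = (d.items.filter (fun p => !(p.1 == kv.1))).map Prod.fst := by
        simp only [PySem.Dict.keys, herase]
      rw [this]
      exact (List.Sublist.map Prod.fst List.filter_sublist).nodup h
    rw [pvAltLoop_items (d.erase kv.1) hnd', herase, List.filter_filter]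
    apply List.filter_congr
    intro p hp
    by_cases hpk : p.1 = kv.1
    · -- with distinct keys, p = kv, which is flagged: both sides false
      have hpe : p = kv := List.inj_on_of_nodup_map h hp hkv hpk
      simp [hpe, hP]
    · simp [hpk]
termination_by d.items.length
decreasing_by exact pvEraseLenLt _ _ (List.mem_of_find?_eq_some (by assumption))

-- erasing each key of ks in turn filters the items down to those whose key is not in ks
theorem items_foldl_erase (ks : List String) (dd : PySem.Dict String (List (String × Bool))) :
    (ks.foldl (fun dd k => dd.erase k) dd).items
      = dd.items.filter (fun kv => !(ks.contains kv.1)) := by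
  induction ks generalizing dd with
  | nil => simp
  | cons k ks ih =>
    rw [List.foldl_cons, ih]
    have h : (dd.erase k).items = dd.items.filter (fun p => !(p.1 == k)) := rfl
    rw [h, List.filter_filter]
    apply List.filter_congr
    intro kv _
    show (!(List.contains ks kv.1) && !(kv.1 == k)) = !(List.contains (k :: ks) kv.1)
    by_cases hk : kv.1 = k <;> simp [hk, Bool.and_comm]

-- with distinct keys, a key occurs among the filtered keys iff its own entry passes the filter
theorem contains_map_fst_filter (l : List (String × List (String × Bool)))
    (h : (l.map Prod.fst).Nodup) (P : String × List (String × Bool) → Bool)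
    (kv : String × List (String × Bool)) (hkv : kv ∈ l) :
    (((l.filter P).map Prod.fst).contains kv.1) = P kv := by
  by_cases hp : P kv = true
  · rw [hp]
    have hm : kv.1 ∈ (l.filter P).map Prod.fst :=
      List.mem_map_of_mem (List.mem_filter.2 ⟨hkv, hp⟩)
    simpa using hm
  · have hp' : P kv = false := by revert hp; cases P kv <;> simp
    rw [hp']
    have hm : kv.1 ∉ (l.filter P).map Prod.fst := by
      intro hmem
      obtain ⟨kv', hkv', hfst⟩ := List.mem_map.1 hmem
      obtain ⟨hkv'l, hPkv'⟩ := List.mem_filter.1 hkv'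
      have he : kv' = kv := List.inj_on_of_nodup_map h hkv'l hkv hfst
      rw [he] at hPkv'
      exact hp hPkv'
    simpa using hm

-- ===== VERDICT (by name: the statement is the Claim_ definition above) =====
theorem delete_empty_layouts_spec : Claim_equal_delete_empty_layouts := by
  intro dictionary _ _
  unfold Spec_delete_empty_layouts delete_empty_layouts delete_empty_layouts_alt
  simp only
  rw [pvAltLoop_items _ (PySem.Dict.nodup_keys_ofList dictionary)]
  simp only [PySem.List.foldl_append_if
        (fun kv : String × List (String × Bool) =>
          ((PySem.Dict.ofList kv.2).get? "available") == some true)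
        (fun kv => kv.1)]
  rw [List.nil_append, items_foldl_erase]
  apply List.filter_congr
  intro kv hkv
  rw [contains_map_fst_filter _ (PySem.Dict.nodup_keys_ofList dictionary) _ kv hkv]
  rfl
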